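-- pv_equiv track=rewrite | github.com/9thbit/advent-of-code-2018 | day05.py | collapse_opposite_polarity_characters
-- ===== SOURCE A (Python) =====
-- def check_is_opposites(character1, character2):
--     return (
--         character1 and
--         character2 and
--         character1 != character2 and
--         character1.upper() == character2.upper()
--     )
--
-- def collapse_opposite_polarity_characters(input_string, characters_to_skip=None):
--     remaining_characters = []
--
--     def collapse_previous_characters():
--         while remaining_characters:
--             character1 = remaining_characters.pop() if remaining_characters else None
--             character2 = remaining_characters.pop() if remaining_characters else None
--
--             if not check_is_opposites(character1, character2):
--                 if character2:
--                     remaining_characters.append(character2)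
--                 if character1:
--                     remaining_characters.append(character1)
--                 break
--
--     for character in input_string:
--         if characters_to_skip and character in characters_to_skip:
--             continue
--
--         remaining_characters.append(character)
--         collapse_previous_characters()
--
--     return ''.join(remaining_characters)
-- ===== SOURCE B (Python) =====
-- def collapse_opposite_polarity_characters(input_string, characters_to_skip=None):
--     def opposites(a, b):
--         return a != b and a.upper() == b.upper()
--
--     chars = [c for c in input_string
--              if not (characters_to_skip and c in characters_to_skip)]
--     while True:
--         out = []
--         changed = False
--         i = 0
--         while i < len(chars):
--             if i + 1 < len(chars) and opposites(chars[i], chars[i + 1]):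
--                 i += 2
--                 changed = True
--             else:
--                 out.append(chars[i])
--                 i += 1
--         chars = out
--         if not changed:
--             return ''.join(chars)
-- ===== Notes on version B (the rewrite author's own statement) =====
-- stated objective: alternative
-- what changed: Replaces A's incremental stack with inner pop/restore loop by a whole-list fixed-point rewriting: filter skipped characters once, then repeatedly scan left-to-right deleting adjacent opposite-polarity pairs until a pass changes nothing.
import Mathlib
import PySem

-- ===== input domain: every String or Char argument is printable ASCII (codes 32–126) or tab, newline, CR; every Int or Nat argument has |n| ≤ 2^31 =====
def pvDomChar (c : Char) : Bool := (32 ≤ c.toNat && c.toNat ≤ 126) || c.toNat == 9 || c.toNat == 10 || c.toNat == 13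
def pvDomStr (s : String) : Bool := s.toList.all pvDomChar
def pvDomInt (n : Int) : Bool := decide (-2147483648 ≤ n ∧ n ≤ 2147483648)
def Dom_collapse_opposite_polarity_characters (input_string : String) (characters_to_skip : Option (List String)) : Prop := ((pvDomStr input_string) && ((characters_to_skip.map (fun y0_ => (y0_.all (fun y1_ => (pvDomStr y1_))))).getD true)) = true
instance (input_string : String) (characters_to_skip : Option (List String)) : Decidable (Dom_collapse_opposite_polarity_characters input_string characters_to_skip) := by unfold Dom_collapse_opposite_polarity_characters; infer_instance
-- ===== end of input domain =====

-- B replaces A's incremental stack (with its pop/restore inner while loop) by repeated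
-- whole-list scans that delete adjacent opposite-polarity pairs until a fixed point;
-- objective: alternative algorithm (not faster).

-- ===== PORT A =====
-- check_is_opposites(character1, character2); arguments may be None (falsy → False);
-- a character popped from the stack is a 1-char string, always truthy.
def pvCheckIsOpposites (c1 c2 : Option Char) : Bool :=
  match c1, c2 with
  | some a, some b => (a != b) && (PySem.Chars.upper [a] == PySem.Chars.upper [b])
  | _, _ => false

-- collapse_previous_characters: the stack remaining_characters is represented with its
-- TOP (Python's list end, where append/pop act) at the HEAD; the final join reverses.
def pvCollapsePrev : List Char → List Char
  | [] => []                       -- while condition fails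
  | [c1] => [c1]                   -- c2 is None: not opposites, c1 re-appended, break
  | c1 :: c2 :: rest =>
      if pvCheckIsOpposites (some c1) (some c2) then pvCollapsePrev rest
      else c1 :: c2 :: rest        -- re-append c2 then c1, break

-- skip test: `characters_to_skip and character in characters_to_skip` (empty list is falsy)
def pvSkipA (characters_to_skip : Option (List String)) (c : Char) : Bool :=
  match characters_to_skip with
  | some l => (!l.isEmpty) && l.contains (String.mk [c])
  | none => false

def collapse_opposite_polarity_characters (input_string : String) (characters_to_skip : Option (List String)) : String :=
  let remaining := input_string.toList.foldl
    (fun rem c => if pvSkipA characters_to_skip c then rem else pvCollapsePrev (c :: rem)) []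
  String.mk remaining.reverse      -- ''.join in Python order = reverse of the top-first stack

-- ===== PORT B =====
def pvOppB (a b : Char) : Bool := (a != b) && (PySem.Chars.upper [a] == PySem.Chars.upper [b])

-- B's own guard `characters_to_skip and c in characters_to_skip` (same condition as A's)
def pvSkipB (characters_to_skip : Option (List String)) (c : Char) : Bool :=
  match characters_to_skip with
  | some l => (!l.isEmpty) && l.contains (String.mk [c])
  | none => false

-- one left-to-right pass: deletes adjacent opposite pairs, second component = changed flag
def pvPass : List Char → List Char × Bool
  | [] => ([], false)
  | [c] => ([c], false)
  | a :: b :: rest =>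
      if pvOppB a b then ((pvPass rest).1, true)
      else
        let p := pvPass (b :: rest)
        (a :: p.1, p.2)
termination_by l => l.length

theorem pvPass_length_le : ∀ l : List Char, (pvPass l).1.length ≤ l.length := by
  intro l
  fun_induction pvPass l with
  | case1 => simp
  | case2 c => simp
  | case3 a b rest h ih => simp; omega
  | case4 a b rest h p ih => simp only [p] at ih ⊢; simp at ih ⊢; omega

theorem pvPass_shorter : ∀ l : List Char, (pvPass l).2 = true → (pvPass l).1.length < l.length := by
  intro l
  fun_induction pvPass l with
  | case1 => simp
  | case2 c => simp
  | case3 a b rest h ih =>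
      intro _
      have := pvPass_length_le rest
      simp; omega
  | case4 a b rest h p ih =>
      intro hch
      simp only [p] at hch ih ⊢
      have := ih hch
      simp at this ⊢
      omega

-- the outer `while True` loop: repeat passes until no change
def pvFix (l : List Char) : List Char :=
  let p := pvPass l
  if h : p.2 = true then pvFix p.1 else p.1
termination_by l.length
decreasing_by exact pvPass_shorter l h

def collapse_opposite_polarity_characters_alt (input_string : String) (characters_to_skip : Option (List String)) : String :=
  let chars := input_string.toList.filter (fun c => !pvSkipB characters_to_skip c)
  String.mk (pvFix chars)

-- ===== PRECONDITION & SPEC =====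
def Spec_collapse_opposite_polarity_characters (input_string : String) (characters_to_skip : Option (List String)) (out : String) : Prop := out = collapse_opposite_polarity_characters_alt input_string characters_to_skip
instance (input_string : String) (characters_to_skip : Option (List String)) (out : String) : Decidable (Spec_collapse_opposite_polarity_characters input_string characters_to_skip out) := by unfold Spec_collapse_opposite_polarity_characters; infer_instance

-- ===== CLAIM (what is proved, stated in full; the proofs are below) =====
def Claim_equal_collapse_opposite_polarity_characters : Prop := ∀ (input_string : String) (characters_to_skip : Option (List String)), Dom_collapse_opposite_polarity_characters input_string characters_to_skip → Spec_collapse_opposite_polarity_characters input_string characters_to_skip (collapse_opposite_polarity_characters input_string characters_to_skip)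

-- ===== LEMMAS AND PROOFS =====

-- the clean one-step push/annihilate on a top-first stack; both ports reduce to folds of pvStep
def pvStep (S : List Char) (a : Char) : List Char :=
  match S with
  | t :: S' => if pvOppB t a then S' else a :: S
  | [] => [a]

-- "no adjacent opposite-polarity pair"
def pvNA (l : List Char) : Prop := List.IsChain (fun a b => pvOppB a b = false) l

theorem pvOppB_iff (a b : Char) :
    pvOppB a b = true ↔ a ≠ b ∧ PySem.Chars.upperChar a = PySem.Chars.upperChar b := by
  simp [pvOppB, PySem.Chars.upper]

theorem pvOppB_symm (a b : Char) : pvOppB a b = pvOppB b a := by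
  rw [Bool.eq_iff_iff, pvOppB_iff, pvOppB_iff]
  constructor <;> rintro ⟨h1, h2⟩ <;> exact ⟨Ne.symm h1, h2.symm⟩

theorem pvChar_eq_of_toNat {a b : Char} (h : a.toNat = b.toNat) : a = b := by
  rw [← Char.ofNat_toNat a, ← Char.ofNat_toNat b, h]

theorem pvChar_le_iff (c d : Char) : c ≤ d ↔ c.toNat ≤ d.toNat := by
  rw [Char.le_def]; exact UInt32.le_iff_toNat_le

theorem pvUpperChar_toNat (c : Char) :
    (PySem.Chars.upperChar c).toNat
      = if 97 ≤ c.toNat ∧ c.toNat ≤ 122 then c.toNat - 32 else c.toNat := by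
  unfold PySem.Chars.upperChar PySem.Chars.islower
  by_cases h : 97 ≤ c.toNat ∧ c.toNat ≤ 122
  · have h1 : 'a' ≤ c := (pvChar_le_iff _ _).mpr h.1
    have h2 : c ≤ 'z' := (pvChar_le_iff _ _).mpr h.2
    simp only [h1, h2, decide_true, Bool.and_self, if_true, if_pos h, Char.toNat_ofNat]
    rw [if_pos (Or.inl (by omega))]
  · have hn : ¬ ('a' ≤ c ∧ c ≤ 'z') := by
      rw [pvChar_le_iff, pvChar_le_iff]; exact h
    simp only [if_neg h]
    rcases not_and_or.mp hn with h' | h' <;> simp [h']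

-- each character has at most one opposite (true for ALL Chars under PySem's ASCII upperChar)
theorem pvOppB_unique {t a b : Char} (h1 : pvOppB t a = true) (h2 : pvOppB a b = true) :
    t = b := by
  rw [pvOppB_iff] at h1 h2
  obtain ⟨hta, huta⟩ := h1
  obtain ⟨hab, huab⟩ := h2
  have e1 := congrArg Char.toNat huta
  have e2 := congrArg Char.toNat huab
  rw [pvUpperChar_toNat, pvUpperChar_toNat] at e1 e2
  have hxy : t.toNat ≠ a.toNat := fun h => hta (pvChar_eq_of_toNat h)
  have hyz : a.toNat ≠ b.toNat := fun h => hab (pvChar_eq_of_toNat h)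
  apply pvChar_eq_of_toNat
  split_ifs at e1 e2 <;> omega

theorem pvStep_step {S : List Char} {a b : Char}
    (hab : pvOppB a b = true) (hna : pvNA S) : pvStep (pvStep S a) b = S := by
  rcases S with _ | ⟨t, S'⟩
  · simp [pvStep, hab]
  · by_cases h : pvOppB t a = true
    · have htb : t = b := pvOppB_unique h hab
      subst htb
      rcases S' with _ | ⟨n, S''⟩
      · simp [pvStep, h]
      · have htn : pvOppB t n = false := by
          have := (List.isChain_cons.mp hna).1
          simpa using this n rfl
        have hnt : pvOppB n t = false := by
          rw [pvOppB_symm]; exact htn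
        simp [pvStep, h, hnt]
    · simp [pvStep, h, hab]

theorem pvNA_step {S : List Char} (a : Char) (h : pvNA S) : pvNA (pvStep S a) := by
  match S with
  | [] => simp [pvStep, pvNA]
  | t :: S' =>
      by_cases ht : pvOppB t a = true
      · simpa [pvStep, ht] using h.tail
      · have hat : pvOppB a t = false := by rw [pvOppB_symm]; simpa using ht
        rw [pvStep, if_neg ht]
        exact List.isChain_cons.mpr
          ⟨by intro y hy; simp at hy; exact hy ▸ hat, h⟩

theorem pvCollapsePrev_of_NA {l : List Char} (h : pvNA l) : pvCollapsePrev l = l := by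
  match l with
  | [] => rfl
  | [c] => rfl
  | c1 :: c2 :: rest =>
      have h12 : pvOppB c1 c2 = false := by
        have := (List.isChain_cons.mp h).1
        simpa using this c2 rfl
      have : pvCheckIsOpposites (some c1) (some c2) = false := h12
      simp [pvCollapsePrev, this]

theorem pvCollapsePrev_step {S : List Char} (a : Char) (h : pvNA S) :
    pvCollapsePrev (a :: S) = pvStep S a := by
  rcases S with _ | ⟨t, S'⟩
  · rfl
  · have htl : pvNA S' := h.tail
    by_cases hat : pvOppB a t = true
    · have hta : pvOppB t a = true := by rwa [pvOppB_symm] at hat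
      have hc : pvCheckIsOpposites (some a) (some t) = true := hat
      simp only [pvCollapsePrev, hc, if_pos]
      rw [pvCollapsePrev_of_NA htl]
      simp [pvStep, hta]
    · have hatf : pvOppB a t = false := by simpa using hat
      have hta : pvOppB t a = false := by rw [pvOppB_symm]; exact hatf
      have hc : pvCheckIsOpposites (some a) (some t) = false := hatf
      simp [pvCollapsePrev, hc, pvStep, hta]

theorem pvFoldA (skip : Char → Bool) :
    ∀ (l : List Char) (S : List Char), pvNA S →
      l.foldl (fun rem c => if skip c then rem else pvCollapsePrev (c :: rem)) S
        = (l.filter (fun c => !skip c)).foldl pvStep S := by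
  intro l
  induction l with
  | nil => intro S _; rfl
  | cons a l ih =>
      intro S hS
      by_cases h : skip a = true
      · simp [h, List.filter_cons, ih S hS]
      · have hf : skip a = false := by simpa using h
        simp only [List.foldl_cons, List.filter_cons, hf, Bool.not_false, if_true,
          Bool.false_eq_true, if_false]
        rw [pvCollapsePrev_step a hS, ih _ (pvNA_step a hS)]

theorem pvPass_no_change :
    ∀ l : List Char, (pvPass l).2 = false → (pvPass l).1 = l ∧ pvNA l := by
  intro l
  fun_induction pvPass l with
  | case1 => simp [pvNA]
  | case2 c => simp [pvNA]
  | case3 a b rest h ih => simp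
  | case4 a b rest h p ih =>
      intro hch
      simp only [p] at hch ⊢
      obtain ⟨h1, h2⟩ := ih hch
      refine ⟨by simp [h1], ?_⟩
      exact List.isChain_cons.mpr
        ⟨by intro y hy; simp at hy; exact hy ▸ (by simpa using h), h2⟩

theorem pvSR_of_NA :
    ∀ (l S : List Char), List.IsChain (fun a b => pvOppB a b = false) (l.reverse ++ S) →
      l.foldl pvStep S = l.reverse ++ S := by
  intro l
  induction l with
  | nil => intro S _; simp
  | cons a l ih =>
      intro S h
      have hrw : (a :: l).reverse ++ S = l.reverse ++ (a :: S) := by simp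
      rw [hrw] at h
      have htail : List.IsChain (fun a b => pvOppB a b = false) (a :: S) :=
        h.suffix (List.suffix_append _ _)
      have hstep : pvStep S a = a :: S := by
        match S with
        | [] => rfl
        | t :: S' =>
            have hat : pvOppB a t = false := by
              have := (List.isChain_cons.mp htail).1
              simpa using this t rfl
            have hta : pvOppB t a = false := by rw [pvOppB_symm]; exact hat
            simp [pvStep, hta]
      rw [List.foldl_cons, hstep, ih (a :: S) h, hrw]

theorem pvPass_preserves : ∀ (n : Nat) (l S : List Char), l.length ≤ n → pvNA S →
    (pvPass l).1.foldl pvStep S = l.foldl pvStep S := by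
  intro n
  induction n with
  | zero =>
      intro l S hl _
      have : l = [] := by cases l <;> simp_all
      subst this; simp [pvPass]
  | succ n ih =>
      intro l S hl hS
      match l with
      | [] => simp [pvPass]
      | [c] => simp [pvPass]
      | a :: b :: rest =>
          by_cases h : pvOppB a b = true
          · have hx : pvPass (a :: b :: rest) = ((pvPass rest).1, true) := by
              simp [pvPass, h]
            rw [hx]
            rw [ih rest S (by simp at hl; omega) hS]
            simp only [List.foldl_cons]
            rw [pvStep_step h hS]
          · have hx : (pvPass (a :: b :: rest)).1 = a :: (pvPass (b :: rest)).1 := by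
              simp [pvPass, h]
            rw [hx]
            simp only [List.foldl_cons]
            rw [ih (b :: rest) (pvStep S a) (by simp at hl ⊢; omega) (pvNA_step a hS)]
            simp only [List.foldl_cons]

theorem pvFix_eq : ∀ (n : Nat) (l : List Char), l.length ≤ n →
    pvFix l = (l.foldl pvStep []).reverse := by
  intro n
  induction n with
  | zero =>
      intro l hl
      have : l = [] := by cases l <;> simp_all
      subst this; rw [pvFix]; simp [pvPass]
  | succ n ih =>
      intro l hl
      rw [pvFix]
      by_cases h : (pvPass l).2 = true
      · simp only [h, dif_pos]
        have hlt := pvPass_shorter l h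
        rw [ih _ (by omega), pvPass_preserves (n + 1) l [] hl (by simp [pvNA])]
      · simp only [h, dif_neg]
        obtain ⟨h1, h2⟩ := pvPass_no_change l (by simpa using h)
        rw [h1]
        have hna : List.IsChain (fun a b => pvOppB a b = false) (l.reverse ++ []) := by
          simp only [List.append_nil]
          rw [List.isChain_reverse]
          exact h2.imp (fun {x y} hxy => by rw [pvOppB_symm]; exact hxy)
        rw [pvSR_of_NA l [] hna]
        simp

-- ===== VERDICT (by name: the statement is the Claim_ definition above) =====
theorem collapse_opposite_polarity_characters_spec :
    Claim_equal_collapse_opposite_polarity_characters := by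
  intro s cts _
  unfold Spec_collapse_opposite_polarity_characters
  unfold collapse_opposite_polarity_characters collapse_opposite_polarity_characters_alt
  simp only []
  have hskip : pvSkipB = pvSkipA := rfl
  rw [hskip, pvFoldA (pvSkipA cts) s.toList [] (by simp [pvNA])]
  rw [pvFix_eq (s.toList.filter (fun c => !pvSkipA cts c)).length _ le_rfl]
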